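-- pv_equiv track=rewrite | github.com/RainTreeCrow/NJU-CS-2019-23 | 19-20-1 SICP/20191017/test.py | witness
-- ===== SOURCE A (Python) =====
-- def witness(list):
--     if len(list) == 1:
--         return 1
--     else:
--         if max(list[:-1]) < list[len(list) - 1]:
--             return witness(list[:-1]) + 1
--         else:
--             return witness(list[:-1])
-- ===== SOURCE B (Python) =====
-- def witness(list):
--     count = 0
--     best = None
--     for x in list:
--         if best is None or x > best:
--             count += 1
--             best = x
--     return count
-- ===== Notes on version B (the rewrite author's own statement) =====
-- stated objective: faster
-- what changed: replaced the recursion that rebuilds list[:-1] and rescans it with max() at every step by a single left-to-right pass keeping the running maximum and a counter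
import Mathlib
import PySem

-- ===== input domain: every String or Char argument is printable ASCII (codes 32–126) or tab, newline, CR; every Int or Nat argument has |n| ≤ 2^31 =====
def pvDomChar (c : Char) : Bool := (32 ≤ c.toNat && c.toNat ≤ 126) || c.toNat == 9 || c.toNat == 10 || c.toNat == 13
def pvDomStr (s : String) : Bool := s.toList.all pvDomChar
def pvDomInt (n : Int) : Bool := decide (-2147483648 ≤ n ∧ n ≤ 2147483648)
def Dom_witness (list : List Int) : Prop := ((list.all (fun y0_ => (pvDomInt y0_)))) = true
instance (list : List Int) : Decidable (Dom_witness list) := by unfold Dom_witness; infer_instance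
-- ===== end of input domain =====

-- B is a single pass tracking the running maximum (O(n)) instead of A's recursion
-- that rebuilds list[:-1] and rescans it with max() at each step (O(n^2)).

-- ===== PORT A =====
-- literal port of A; the 'none' branch of max? is where Python raises ValueError (excluded by Pre_)
def witness (list : List Int) : Int :=
  if list.length = 1 then 1
  else
    match h : PySem.List.max? (PySem.List.slice list none (some (-1))) (fun y => y) with
    | none => 0
    | some m =>
      if m < PySem.List.pyGetD list ((list.length : Int) - 1) 0 then
        witness (PySem.List.slice list none (some (-1))) + 1
      else
        witness (PySem.List.slice list none (some (-1)))
termination_by list.length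
decreasing_by
  all_goals
    have hne : list ≠ [] := by
      intro hnil; subst hnil
      rw [PySem.List.slice_to_neg_one] at h
      simp [PySem.List.max?] at h
    rw [PySem.List.slice_to_neg_one]
    have hpos := List.length_pos_of_ne_nil hne
    simp [List.length_dropLast]
    omega

-- ===== PORT B =====
def witnessAltStep (st : Int × Option Int) (x : Int) : Int × Option Int :=
  match st.2 with
  | none => (st.1 + 1, some x)
  | some best => if best < x then (st.1 + 1, some x) else (st.1, some best)

def witness_alt (list : List Int) : Int :=
  (list.foldl witnessAltStep (0, none)).1

-- ===== PRECONDITION & SPEC =====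
-- Pre_ excludes only the empty list, on which A raises ValueError (max() of an empty sequence).
def Pre_witness (list : List Int) : Prop := list ≠ []
instance (list : List Int) : Decidable (Pre_witness list) := by unfold Pre_witness; infer_instance
def pvWitness_witness : List Int := ([1, 3, 2])

def Spec_witness (list : List Int) (out : Int) : Prop := out = witness_alt list
instance (list : List Int) (out : Int) : Decidable (Spec_witness list out) := by unfold Spec_witness; infer_instance

-- ===== CLAIM (what is proved, stated in full; the proofs are below) =====
def Claim_equal_witness : Prop := ∀ (list : List Int), Dom_witness list → Pre_witness list → Spec_witness list (witness list)

-- ===== LEMMAS AND PROOFS =====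

-- main invariant: on a nonempty list A's value equals B's fold counter, and the
-- fold's second component is the running maximum (= Python max of the list)
theorem witness_main (l : List Int) (hl : l ≠ []) :
    witness l = (l.foldl witnessAltStep (0, none)).1 ∧
    (l.foldl witnessAltStep (0, none)).2 = PySem.List.max? l (fun y => y) := by
  induction l using List.reverseRecOn with
  | nil => exact absurd rfl hl
  | append_singleton l x ih =>
    rcases l with _ | ⟨y, t⟩
    · constructor
      · rw [witness]; simp [witnessAltStep]
      · simp [witnessAltStep, PySem.List.max?_id_cons]
    · obtain ⟨ih1, ih2⟩ := ih (by simp)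
      have hmax : PySem.List.max? (y :: t) (fun y => y) = some (t.foldl max y) :=
        PySem.List.max?_id_cons y t
      have hmax2 : PySem.List.max? ((y :: t) ++ [x]) (fun y => y)
          = some (max (t.foldl max y) x) := by
        rw [List.cons_append, PySem.List.max?_id_cons, List.foldl_append]
        simp
      have hsnd : ((y :: t).foldl witnessAltStep (0, none)).2 = some (t.foldl max y) := by
        rw [ih2, hmax]
      have hfold : ((y :: t) ++ [x]).foldl witnessAltStep (0, none)
          = witnessAltStep ((y :: t).foldl witnessAltStep (0, none)) x :=
        List.foldl_append ..
      have hstate : (y :: t).foldl witnessAltStep (0, none)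
          = (((y :: t).foldl witnessAltStep (0, none)).1, some (t.foldl max y)) :=
        Prod.ext rfl hsnd
      have hget : PySem.List.pyGetD ((y :: t) ++ [x]) ((((y :: t) ++ [x]).length : Int) - 1) 0 = x := by
        have hidx : ((((y :: t) ++ [x]).length : Int)) - 1 = ((t.length + 1 : Nat) : Int) := by
          simp
        rw [hidx, PySem.List.pyGetD_natCast]
        simp [List.getD]
      have hA : witness ((y :: t) ++ [x])
          = if t.foldl max y < x then witness (y :: t) + 1 else witness (y :: t) := by
        rw [witness]
        rw [if_neg (by simp)]
        rw [PySem.List.slice_to_neg_one, List.dropLast_concat]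
        split
        · next heq => rw [hmax] at heq; exact absurd heq (by simp)
        · next m heq =>
            rw [hmax] at heq
            injection heq with hm
            subst hm
            rw [hget]
      constructor
      · rw [hA, hfold, hstate]
        by_cases hc : t.foldl max y < x
        · simp [witnessAltStep, hc, ih1]
        · simp [witnessAltStep, hc, ih1]
      · rw [hfold, hstate, hmax2]
        by_cases hc : t.foldl max y < x
        · simp [witnessAltStep, hc]; omega
        · simp [witnessAltStep, hc]; omega

-- ===== VERDICT (by name: the statement is the Claim_ definition above) =====
theorem witness_spec : Claim_equal_witness := by
  intro l _ hpre
  unfold Spec_witness witness_alt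
  exact (witness_main l hpre).1
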